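-- pv_equiv track=rewrite | github.com/Thome/ssd.pytorch | data/bp.py | imgToAnns
-- ===== SOURCE A (Python) =====
-- def imgToAnns(annotations, img_id):
--     found = 0
--     anns = []
--     for line in annotations:
--         line = line.split(',')
--         if (line[0] == img_id):
--             found = 1
--             anns.append(line)
--         if (line[0] != img_id):
--             if (not found):
--                 continue
--             if (found):
--                 break
--     return anns
-- ===== SOURCE B (Python) =====
-- def imgToAnns(annotations, img_id):
--     # Group-span scan: split all lines once, then jump over maximal runs of
--     # equal first fields; return the first run keyed by img_id, else [].
--     rows = [line.split(',') for line in annotations]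
--     n = len(rows)
--     i = 0
--     while i < n:
--         key = rows[i][0]
--         j = i
--         while j < n and rows[j][0] == key:
--             j += 1
--         if key == img_id:
--             return rows[i:j]
--         i = j
--     return []
-- ===== Notes on version B (the rewrite author's own statement) =====
-- stated objective: alternative
-- what changed: Replaces the per-line found-flag/break state machine with a group-span scan: split all lines once, then jump over maximal runs of equal first fields and return the first run keyed by img_id.
import Mathlib
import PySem

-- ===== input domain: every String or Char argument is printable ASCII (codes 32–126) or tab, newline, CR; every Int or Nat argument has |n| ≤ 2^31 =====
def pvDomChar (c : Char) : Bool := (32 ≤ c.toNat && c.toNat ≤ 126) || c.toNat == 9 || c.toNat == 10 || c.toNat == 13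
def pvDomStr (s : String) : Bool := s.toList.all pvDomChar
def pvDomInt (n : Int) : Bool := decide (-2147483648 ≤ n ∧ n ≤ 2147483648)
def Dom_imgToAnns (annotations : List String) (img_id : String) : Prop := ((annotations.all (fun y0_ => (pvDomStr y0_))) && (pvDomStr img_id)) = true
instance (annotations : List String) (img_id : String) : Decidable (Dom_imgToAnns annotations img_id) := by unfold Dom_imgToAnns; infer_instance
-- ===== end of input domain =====

-- B replaces A's per-line found-flag/break state machine with a group-span scan
-- (split once, skip maximal runs of equal first fields); objective: alternative, same cost.

-- ===== PORT A =====
-- A's for-loop with its found flag and break, as structural recursion over the lines.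
-- line.split(','): sep ≠ "" so PySem.Str.split? is always some (the getD [] default is unreachable);
-- line[0]: split(',') is always nonempty, so index 0 is the head (headD's default is unreachable).
def imgToAnnsLoop (annotations : List String) (img_id : String) (found : Bool) (anns : List (List String)) : List (List String) :=
  match annotations with
  | [] => anns
  | line :: rest =>
    let l := (PySem.Str.split? line ",").getD []
    if l.headD "" == img_id then
      imgToAnnsLoop rest img_id true (anns ++ [l])
    else
      if found then anns  -- break
      else imgToAnnsLoop rest img_id found anns  -- continue

def imgToAnns (annotations : List String) (img_id : String) : List (List String) :=
  imgToAnnsLoop annotations img_id false []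

-- ===== PORT B =====
-- B: split all lines once, then jump over maximal runs of equal first fields
-- until the run keyed by img_id (the inner while = takeWhile/dropWhile of the run).
def imgToAnnsGroups (img_id : String) (rows : List (List String)) : List (List String) :=
  match rows with
  | [] => []
  | r :: rest =>
    let key := r.headD ""
    if key == img_id then r :: rest.takeWhile (fun s => s.headD "" == key)
    else imgToAnnsGroups img_id (rest.dropWhile (fun s => s.headD "" == key))
termination_by rows.length
decreasing_by
  simp only [List.length_cons]
  exact Nat.lt_succ_of_le (List.length_dropWhile_le _ _)

def imgToAnns_alt (annotations : List String) (img_id : String) : List (List String) :=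
  imgToAnnsGroups img_id (annotations.map (fun line => (PySem.Str.split? line ",").getD []))

-- ===== PRECONDITION & SPEC =====
def Spec_imgToAnns (annotations : List String) (img_id : String) (out : List (List String)) : Prop := out = imgToAnns_alt annotations img_id
instance (annotations : List String) (img_id : String) (out : List (List String)) : Decidable (Spec_imgToAnns annotations img_id out) := by unfold Spec_imgToAnns; infer_instance

-- ===== CLAIM (what is proved, stated in full; the proofs are below) =====
def Claim_equal_imgToAnns : Prop := ∀ (annotations : List String) (img_id : String), Dom_imgToAnns annotations img_id → Spec_imgToAnns annotations img_id (imgToAnns annotations img_id)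

-- ===== LEMMAS AND PROOFS =====

-- found = true phase: A appends while the first field matches and breaks at the
-- first mismatch, i.e. it appends exactly the takeWhile of the remaining rows.
theorem loop_found (annotations : List String) (img_id : String) (anns : List (List String)) :
    imgToAnnsLoop annotations img_id true anns
      = anns ++ (annotations.map (fun line => (PySem.Str.split? line ",").getD [])).takeWhile
          (fun s => s.headD "" == img_id) := by
  induction annotations generalizing anns with
  | nil => simp [imgToAnnsLoop]
  | cons line rest ih =>
    simp only [imgToAnnsLoop, List.map_cons, List.takeWhile_cons]
    by_cases h : (((PySem.Str.split? line ",").getD []).headD "" == img_id) = true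
    · rw [if_pos h, ih, if_pos h, List.append_assoc, List.singleton_append]
    · rw [if_neg h, if_neg h, List.append_nil]; simp

-- skipping a whole run whose key is not img_id does not change B's result
theorem groups_dropWhile (img_id key : String) (rows : List (List String)) (hk : key ≠ img_id) :
    imgToAnnsGroups img_id (rows.dropWhile (fun s => s.headD "" == key))
      = imgToAnnsGroups img_id rows := by
  cases rows with
  | nil => rfl
  | cons r rest =>
    rw [List.dropWhile_cons]
    by_cases h : (r.headD "" == key) = true
    · have hkey : r.headD "" = key := by simpa using h
      rw [if_pos h]
      conv_rhs => rw [imgToAnnsGroups]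
      have hne : (r.headD "" == img_id) = false := by
        rw [hkey]; exact beq_eq_false_iff_ne.mpr hk
      rw [hkey] at hne
      simp only [hkey, hne, Bool.false_eq_true, if_false]
    · rw [if_neg h]

-- the not-yet-found phase of A equals B's run-skipping scan
theorem loop_eq_groups (annotations : List String) (img_id : String) :
    imgToAnnsLoop annotations img_id false []
      = imgToAnnsGroups img_id (annotations.map (fun line => (PySem.Str.split? line ",").getD [])) := by
  induction annotations with
  | nil => simp only [List.map_nil]; rw [imgToAnnsGroups]; rfl
  | cons line rest ih =>
    simp only [imgToAnnsLoop, List.map_cons]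
    rw [imgToAnnsGroups]
    by_cases h : (((PySem.Str.split? line ",").getD []).headD "" == img_id) = true
    · have hkey : ((PySem.Str.split? line ",").getD []).headD "" = img_id := by simpa using h
      simp only [if_true, loop_found, List.nil_append, hkey, beq_self_eq_true,
        List.singleton_append]
    · have hk : ((PySem.Str.split? line ",").getD []).headD "" ≠ img_id := by simpa using h
      simp only [h, Bool.false_eq_true, if_false, ih]
      rw [groups_dropWhile _ _ _ hk]

-- ===== VERDICT (by name: the statement is the Claim_ definition above) =====
theorem imgToAnns_spec : Claim_equal_imgToAnns := by
  intro annotations img_id _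
  unfold Spec_imgToAnns imgToAnns imgToAnns_alt
  exact loop_eq_groups annotations img_id
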